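-- pv_equiv track=rewrite | github.com/YaoQiTrans/UAV-Sensing-Network-Optimization | ConstraintReduction_gslm/ablation_runner_full.py | filter_logical_pairs
-- ===== SOURCE A (Python) =====
-- def filter_logical_pairs(links_per_route, candidate_pairs):
--     """
--     Mode C & D: Logical Sieve (Constraint Reduction)
--     对输入的 candidate_pairs 进行逻辑包含检查。
--     如果 Diff(r1, r2) ⊆ Diff(r3, r4)，则 (r1, r2) 是冗余的（注意：是大的集合冗余还是小的？
--     修正：在此类覆盖问题中，如果是 Set Cover 形式：sum(x) >= 1。
--     如果 Set A ⊆ Set B，那么满足 Set A >= 1 必然满足 Set B >= 1。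
--     所以，我们要保留的是【最小】的集合 (Minimal Sets)，剔除【较大】的集合。
--     """
--     # 1. 转换：Pair -> Distinguishing Set (Link Indices)
--     # constraint_map: key=frozenset(links), value=example_pair
--     # 我们只需要保留 Link Set，不需要保留具体的 Pair（因为只要有一个 Pair 生成了这个约束集就行）
--     unique_sets = set()
--
--     for r1, r2 in candidate_pairs:
--         diff = links_per_route[r1].symmetric_difference(links_per_route[r2])
--         if diff:
--             unique_sets.add(frozenset(diff))
--
--     # 2. 逻辑剔除 (Keep Minimal Sets)
--     # 按集合大小排序
--     sorted_sets = sorted(list(unique_sets), key=len)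
--     kept_sets = []
--
--     # 贪婪检查：如果当前集合包含任何已保留的集合，则它是冗余的（大的包含小的）
--     for current_set in sorted_sets:
--         is_redundant = False
--         for kept_set in kept_sets:
--             if kept_set.issubset(current_set):
--                 is_redundant = True
--                 break
--         if not is_redundant:
--             kept_sets.append(current_set)
--
--     return kept_sets
-- ===== SOURCE B (Python) =====
-- def _merge_diff(a, b):
--     # symmetric difference of two sorted duplicate-free lists by a two-pointer merge
--     i = j = 0
--     out = []
--     while i < len(a) and j < len(b):
--         if a[i] < b[j]:
--             out.append(a[i]); i += 1
--         elif b[j] < a[i]: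
--             out.append(b[j]); j += 1
--         else:
--             i += 1; j += 1
--     return out + a[i:] + b[j:]
--
--
-- def filter_logical_pairs(links_per_route, candidate_pairs):
--     # Phase 1: pre-sort every route's link set once, then get each
--     # distinguishing set by a linear two-pointer merge instead of set algebra.
--     routes = {r: sorted(s) for r, s in links_per_route.items()}
--     diffs = {frozenset(d)
--              for r1, r2 in candidate_pairs
--              if (d := _merge_diff(routes[r1], routes[r2]))}
--     # Phase 2: stateless positional sieve — a set is kept iff no set placed
--     # earlier in the length-sorted order is a subset of it (equivalent to A's
--     # grown kept-list test, because any earlier subset is itself preceded only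
--     # by still smaller sets, so some earlier KEPT subset exists too).
--     order = sorted(diffs, key=len)
--     return [s for i, s in enumerate(order)
--             if not any(t <= s for t in order[:i])]
-- ===== Notes on version B (the rewrite author's own statement) =====
-- stated objective: alternative
-- what changed: B pre-sorts each route's link set once and computes every distinguishing set by a linear two-pointer merge instead of set algebra, then replaces A's stateful greedy kept-list with a stateless positional sieve that tests each length-sorted set only against the sets placed earlier in the sorted order.
import Mathlib
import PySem

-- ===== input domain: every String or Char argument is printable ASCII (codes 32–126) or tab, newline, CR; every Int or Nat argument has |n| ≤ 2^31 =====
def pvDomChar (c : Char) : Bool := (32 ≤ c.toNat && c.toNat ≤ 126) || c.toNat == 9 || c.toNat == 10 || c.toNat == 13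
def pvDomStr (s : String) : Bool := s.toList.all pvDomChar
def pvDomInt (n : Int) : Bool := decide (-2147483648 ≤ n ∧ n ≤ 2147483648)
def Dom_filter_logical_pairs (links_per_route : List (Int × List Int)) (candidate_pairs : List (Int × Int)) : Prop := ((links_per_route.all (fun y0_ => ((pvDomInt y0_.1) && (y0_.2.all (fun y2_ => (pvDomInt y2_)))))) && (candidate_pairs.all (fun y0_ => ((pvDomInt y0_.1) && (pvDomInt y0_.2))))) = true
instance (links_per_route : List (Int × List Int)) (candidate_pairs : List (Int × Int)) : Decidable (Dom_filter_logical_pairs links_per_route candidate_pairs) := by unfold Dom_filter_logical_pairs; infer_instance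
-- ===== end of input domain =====

-- B pre-sorts each route once and forms every distinguishing set by a two-pointer merge,
-- then keeps a set iff no earlier set of the length-sorted order is a subset of it
-- (a stateless positional sieve instead of A's grown kept-list); same return value.


-- ===== PORT A =====
-- the distinguishing set links[r1] ^ links[r2], represented canonically
-- (a Python frozenset of ints is rendered as its strictly increasing element list,
-- so frozenset equality is list equality)
def pvDiffSet (links : PySem.Dict Int (List Int)) (p : Int × Int) : List Int :=
  PySem.List.sorted
    (PySem.Set.ofList (PySem.Set.symmDiff (PySem.Set.ofList (links.getD p.1 []))
      (PySem.Set.ofList (links.getD p.2 [])))) (fun x => x)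

-- unique_sets = set(); for r1, r2 in candidate_pairs: diff = …; if diff: unique_sets.add(frozenset(diff))
def pvUniqueSets (links : PySem.Dict Int (List Int)) (cps : List (Int × Int)) : PySem.Set (List Int) :=
  cps.foldl (fun acc p =>
      let diff := pvDiffSet links p
      if diff = [] then acc else acc.add diff) PySem.Set.empty

def filter_logical_pairs (links_per_route : List (Int × List Int)) (candidate_pairs : List (Int × Int)) : List (List Int) :=
  let links : PySem.Dict Int (List Int) := PySem.Dict.mk links_per_route
  let unique_sets : PySem.Set (List Int) := pvUniqueSets links candidate_pairs
  -- sorted_sets = sorted(list(unique_sets), key=len)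
  let sorted_sets := PySem.List.sorted unique_sets (fun s => (s.length : Int))
  -- greedy kept-list loop (inner loop with break = any)
  sorted_sets.foldl (fun kept cur =>
      if kept.any (fun k => PySem.Set.issubset k cur) then kept else kept ++ [cur]) []

-- ===== PORT B =====
-- _merge_diff: two-pointer merge of two sorted duplicate-free lists (the while loop
-- becomes the standard two-list recursion on the same comparisons)
def pvMergeDiff : List Int → List Int → List Int
  | [], b => b
  | a, [] => a
  | x :: a, y :: b =>
      if x < y then x :: pvMergeDiff a (y :: b)
      else if y < x then y :: pvMergeDiff (x :: a) b
      else pvMergeDiff a b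
termination_by a b => a.length + b.length

-- routes = {r: sorted(s) for r, s in links_per_route.items()}
def pvRoutes (links_per_route : List (Int × List Int)) : PySem.Dict Int (List Int) :=
  PySem.Dict.mk ((PySem.Dict.mk links_per_route).items.map
    (fun rs => (rs.1, PySem.List.sorted (PySem.Set.ofList rs.2) (fun x => x))))

def filter_logical_pairs_alt (links_per_route : List (Int × List Int)) (candidate_pairs : List (Int × Int)) : List (List Int) :=
  let routes := pvRoutes links_per_route
  -- diffs = {frozenset(d) for r1, r2 in candidate_pairs if (d := _merge_diff(routes[r1], routes[r2]))}
  let diffs : PySem.Set (List Int) := PySem.Set.ofList (candidate_pairs.filterMap (fun p =>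
      let d := pvMergeDiff (routes.getD p.1 []) (routes.getD p.2 [])
      if d = [] then none else some d))
  -- order = sorted(diffs, key=len)
  let order := PySem.List.sorted diffs (fun s => (s.length : Int))
  -- [s for i, s in enumerate(order) if not any(t <= s for t in order[:i])]
  (PySem.List.enumerate order).filterMap (fun is =>
      if (PySem.List.slice order (some 0) (some is.1)).any (fun t => PySem.Set.issubset t is.2)
      then none else some is.2)

-- ===== PRECONDITION & SPEC =====
-- Pre_ excludes exactly the inputs on which A raises KeyError: a candidate pair
-- naming a route id that is not a key of links_per_route.
def Pre_filter_logical_pairs (links_per_route : List (Int × List Int)) (candidate_pairs : List (Int × Int)) : Prop :=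
  candidate_pairs.all (fun p =>
    (PySem.Dict.mk links_per_route).contains p.1 && (PySem.Dict.mk links_per_route).contains p.2) = true
instance (links_per_route : List (Int × List Int)) (candidate_pairs : List (Int × Int)) : Decidable (Pre_filter_logical_pairs links_per_route candidate_pairs) := by unfold Pre_filter_logical_pairs; infer_instance
def pvWitness_filter_logical_pairs : (List (Int × List Int)) × (List (Int × Int)) :=
  ([(0, [1, 2]), (1, [2, 3]), (2, [1, 2, 3])], [(0, 1), (0, 2), (1, 2)])

def Spec_filter_logical_pairs (links_per_route : List (Int × List Int)) (candidate_pairs : List (Int × Int)) (out : List (List Int)) : Prop := out = filter_logical_pairs_alt links_per_route candidate_pairs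
instance (links_per_route : List (Int × List Int)) (candidate_pairs : List (Int × Int)) (out : List (List Int)) : Decidable (Spec_filter_logical_pairs links_per_route candidate_pairs out) := by unfold Spec_filter_logical_pairs; infer_instance

-- ===== CLAIM (what is proved, stated in full; the proofs are below) =====
def Claim_equal_filter_logical_pairs : Prop := ∀ (links_per_route : List (Int × List Int)) (candidate_pairs : List (Int × Int)), Dom_filter_logical_pairs links_per_route candidate_pairs → Pre_filter_logical_pairs links_per_route candidate_pairs → Spec_filter_logical_pairs links_per_route candidate_pairs (filter_logical_pairs links_per_route candidate_pairs)

-- ===== LEMMAS AND PROOFS =====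

-- A's foldl-with-test loop builds exactly set(<the nonempty diffs in candidate order>)
lemma phase1_eq (links : PySem.Dict Int (List Int)) (cps : List (Int × Int)) :
    pvUniqueSets links cps
      = PySem.Set.ofList (cps.filterMap (fun p =>
          let d := pvDiffSet links p; if d = [] then none else some d)) := by
  rw [PySem.Set.ofList_eq_foldl]
  show List.foldl _ PySem.Set.empty _ = List.foldl _ PySem.Set.empty _
  generalize PySem.Set.empty = acc
  induction cps generalizing acc with
  | nil => rfl
  | cons p t ih =>
      simp only [List.filterMap_cons, List.foldl_cons]
      by_cases h : pvDiffSet links p = [] <;> simp [h, ih]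

-- mapping only the values of a dict literal maps get?
lemma get?_mk_map_values (l : List (Int × List Int)) (f : List Int → List Int) (k : Int) :
    (PySem.Dict.mk (l.map (fun p => (p.1, f p.2)))).get? k = ((PySem.Dict.mk l).get? k).map f := by
  induction l with
  | nil => simp [PySem.Dict.get?]
  | cons p t ih =>
      rw [List.map_cons, PySem.Dict.get?_mk_cons, PySem.Dict.get?_mk_cons]
      split <;> simp [ih]

-- routes[r] is sorted(set(links[r])) (both sides default to [] on a missing key)
lemma routes_getD (lpr : List (Int × List Int)) (r : Int) :
    (pvRoutes lpr).getD r []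
      = PySem.List.sorted (PySem.Set.ofList ((PySem.Dict.mk lpr).getD r [])) (fun x => x) := by
  have hmk : PySem.Dict.mk (PySem.Dict.mk lpr).items = PySem.Dict.mk lpr := by simp [pysem]
  have hmap := get?_mk_map_values (PySem.Dict.mk lpr).items
    (fun s => PySem.List.sorted (PySem.Set.ofList s) (fun x => x)) r
  rw [hmk] at hmap
  cases hgt : (PySem.Dict.mk lpr).get? r with
  | none => simp [PySem.Dict.getD, pvRoutes, hmap, hgt]; rfl
  | some v => simp [PySem.Dict.getD, pvRoutes, hmap, hgt]

-- every strictly increasing list is duplicate-free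
lemma pairwise_lt_nodup {s : List Int} (h : s.Pairwise (· < ·)) : s.Nodup :=
  h.imp (fun hx => ne_of_lt hx)

-- the merge of two strictly increasing lists is strictly increasing and holds
-- exactly the elements of one list and not the other
lemma mergeDiff_spec : ∀ (a b : List Int), a.Pairwise (· < ·) → b.Pairwise (· < ·) →
    (pvMergeDiff a b).Pairwise (· < ·) ∧
      (∀ x, x ∈ pvMergeDiff a b ↔ (x ∈ a ∧ x ∉ b) ∨ (x ∈ b ∧ x ∉ a)) := by
  intro a b ha hb
  fun_induction pvMergeDiff a b with
  | case1 b => simp [hb]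
  | case2 a _ => simp [ha]
  | case3 x a y b hxy ih =>
      have hxa : ∀ z ∈ a, x < z := (List.pairwise_cons.mp ha).1
      have hyb : ∀ z ∈ b, y < z := (List.pairwise_cons.mp hb).1
      obtain ⟨ihp, ihm⟩ := ih (List.pairwise_cons.mp ha).2 hb
      constructor
      · rw [List.pairwise_cons]
        refine ⟨?_, ihp⟩
        intro z hz
        rcases (ihm z).mp hz with ⟨hz1, -⟩ | ⟨hz1, -⟩
        · exact hxa z hz1
        · rcases List.mem_cons.mp hz1 with h | h
          · omega
          · have := hyb z h; omega
      · intro z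
        have hxb : x ∉ y :: b := by
          intro h
          rcases List.mem_cons.mp h with h | h
          · omega
          · have := hyb x h; omega
        have hxna : x ∉ a := fun h => absurd (hxa x h) (lt_irrefl x)
        constructor
        · intro h
          rcases List.mem_cons.mp h with h | h
          · subst h; exact Or.inl ⟨List.mem_cons_self, hxb⟩
          · rcases (ihm z).mp h with ⟨h1, h2⟩ | ⟨h1, h2⟩
            · exact Or.inl ⟨List.mem_cons_of_mem _ h1, h2⟩
            · refine Or.inr ⟨h1, ?_⟩
              intro hc
              rcases List.mem_cons.mp hc with hc | hc
              · subst hc; exact hxb h1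
              · exact h2 hc
        · intro h
          rcases h with ⟨h1, h2⟩ | ⟨h1, h2⟩
          · rcases List.mem_cons.mp h1 with h | h
            · subst h; exact List.mem_cons_self
            · exact List.mem_cons_of_mem _ ((ihm z).mpr (Or.inl ⟨h, h2⟩))
          · refine List.mem_cons_of_mem _ ((ihm z).mpr (Or.inr ⟨h1, ?_⟩))
            intro hc
            exact h2 (List.mem_cons_of_mem _ hc)
  | case4 x a y b hxy hyx ih =>
      have hxa : ∀ z ∈ a, x < z := (List.pairwise_cons.mp ha).1
      have hyb : ∀ z ∈ b, y < z := (List.pairwise_cons.mp hb).1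
      obtain ⟨ihp, ihm⟩ := ih ha (List.pairwise_cons.mp hb).2
      constructor
      · rw [List.pairwise_cons]
        refine ⟨?_, ihp⟩
        intro z hz
        rcases (ihm z).mp hz with ⟨hz1, -⟩ | ⟨hz1, -⟩
        · rcases List.mem_cons.mp hz1 with h | h
          · omega
          · have := hxa z h; omega
        · exact hyb z hz1
      · intro z
        have hya : y ∉ x :: a := by
          intro h
          rcases List.mem_cons.mp h with h | h
          · omega
          · have := hxa y h; omega
        have hynb : y ∉ b := fun h => absurd (hyb y h) (lt_irrefl y)
        constructor
        · intro h
          rcases List.mem_cons.mp h with h | h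
          · subst h; exact Or.inr ⟨List.mem_cons_self, hya⟩
          · rcases (ihm z).mp h with ⟨h1, h2⟩ | ⟨h1, h2⟩
            · refine Or.inl ⟨h1, ?_⟩
              intro hc
              rcases List.mem_cons.mp hc with hc | hc
              · subst hc; exact hya h1
              · exact h2 hc
            · exact Or.inr ⟨List.mem_cons_of_mem _ h1, h2⟩
        · intro h
          rcases h with ⟨h1, h2⟩ | ⟨h1, h2⟩
          · refine List.mem_cons_of_mem _ ((ihm z).mpr (Or.inl ⟨h1, ?_⟩))
            intro hc
            exact h2 (List.mem_cons_of_mem _ hc)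
          · rcases List.mem_cons.mp h1 with h | h
            · subst h; exact List.mem_cons_self
            · exact List.mem_cons_of_mem _ ((ihm z).mpr (Or.inr ⟨h, h2⟩))
  | case5 x a y b hxy hyx ih =>
      have heq : x = y := by omega
      subst heq
      have hxa : ∀ z ∈ a, x < z := (List.pairwise_cons.mp ha).1
      have hyb : ∀ z ∈ b, x < z := (List.pairwise_cons.mp hb).1
      obtain ⟨ihp, ihm⟩ := ih (List.pairwise_cons.mp ha).2 (List.pairwise_cons.mp hb).2
      refine ⟨ihp, ?_⟩
      intro z
      rw [ihm z]
      constructor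
      · rintro (⟨h1, h2⟩ | ⟨h1, h2⟩)
        · refine Or.inl ⟨List.mem_cons_of_mem _ h1, ?_⟩
          intro hc
          rcases List.mem_cons.mp hc with hc | hc
          · subst hc; exact absurd (hxa z h1) (lt_irrefl z)
          · exact h2 hc
        · refine Or.inr ⟨List.mem_cons_of_mem _ h1, ?_⟩
          intro hc
          rcases List.mem_cons.mp hc with hc | hc
          · subst hc; exact absurd (hyb z h1) (lt_irrefl z)
          · exact h2 hc
      · rintro (⟨h1, h2⟩ | ⟨h1, h2⟩)
        · rcases List.mem_cons.mp h1 with h | h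
          · exact absurd (h ▸ List.mem_cons_self) h2
          · exact Or.inl ⟨h, fun hc => h2 (List.mem_cons_of_mem _ hc)⟩
        · rcases List.mem_cons.mp h1 with h | h
          · exact absurd (h ▸ List.mem_cons_self) h2
          · exact Or.inr ⟨h, fun hc => h2 (List.mem_cons_of_mem _ hc)⟩

-- per pair: the two-pointer merge of the pre-sorted routes IS the canonical
-- frozenset of the symmetric difference that A computes
lemma mergeDiff_eq_diffSet (lpr : List (Int × List Int)) (p : Int × Int) :
    pvMergeDiff ((pvRoutes lpr).getD p.1 []) ((pvRoutes lpr).getD p.2 [])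
      = pvDiffSet (PySem.Dict.mk lpr) p := by
  rw [routes_getD lpr p.1, routes_getD lpr p.2]
  set A := (PySem.Dict.mk lpr).getD p.1 [] with hA
  set B := (PySem.Dict.mk lpr).getD p.2 [] with hB
  set sA := PySem.List.sorted (PySem.Set.ofList A) (fun x => x) with hsA
  set sB := PySem.List.sorted (PySem.Set.ofList B) (fun x => x) with hsB
  have hpA : sA.Pairwise (· < ·) := PySem.List.sorted_ofList_pairwise_lt A
  have hpB : sB.Pairwise (· < ·) := PySem.List.sorted_ofList_pairwise_lt B
  obtain ⟨hp, hm⟩ := mergeDiff_spec sA sB hpA hpB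
  have hperm' : (pvMergeDiff sA sB).Perm
      (PySem.Set.ofList (PySem.Set.symmDiff (PySem.Set.ofList A) (PySem.Set.ofList B))) := by
    refine (List.perm_ext_iff_of_nodup (pairwise_lt_nodup hp) (PySem.Set.nodup_ofList _)).mpr ?_
    intro z
    rw [hm z]
    simp only [hsA, hsB, PySem.List.mem_sorted, PySem.Set.mem_ofList, PySem.Set.mem_symmDiff]
  have := PySem.List.sorted_eq_of_perm_of_pairwise_lt
    (PySem.Set.ofList (PySem.Set.symmDiff (PySem.Set.ofList A) (PySem.Set.ofList B)))
    (pvMergeDiff sA sB) (fun x => x) hperm' hp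
  exact this.symm

-- every member of the shared diff collection is a strictly increasing list
lemma mem_diffs_lt {links : PySem.Dict Int (List Int)} {cps : List (Int × Int)} {s : List Int}
    (h : s ∈ cps.filterMap (fun p =>
        let d := pvDiffSet links p; if d = [] then none else some d)) :
    s.Pairwise (· < ·) := by
  simp only [List.mem_filterMap] at h
  obtain ⟨p, -, hp⟩ := h
  by_cases hd : pvDiffSet links p = [] <;> simp [hd] at hp
  subst hp
  exact PySem.List.sorted_ofList_pairwise_lt _

-- a proper subset among strictly increasing lists is strictly shorter
lemma ssub_length_lt {t s : List Int} (ht : t.Pairwise (· < ·)) (hs : s.Pairwise (· < ·))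
    (hsub : ∀ x ∈ t, x ∈ s) (hne : t ≠ s) : t.length < s.length := by
  have hsp : t.Subperm s := (pairwise_lt_nodup ht).subperm hsub
  rcases lt_or_eq_of_le hsp.length_le with h | h
  · exact h
  · exact absurd (List.Perm.eq_of_pairwise
      (fun a b _ _ hab hba => absurd hba (lt_asymm hab)) ht hs
      (hsp.perm_of_length_le h.ge)) hne

-- A-side crux: testing cur against the kept (minimal) sets of the length-sorted prefix
-- is the same as testing cur against the whole collection for a proper subset
lemma kept_test_eq (U : List (List Int)) (done cur : _) (rest : List (List Int))
    (hmem : ∀ s ∈ U, s.Pairwise (· < ·))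
    (hperm : (done ++ cur :: rest).Perm U)
    (hnd : (done ++ cur :: rest).Nodup)
    (hpw : (done ++ cur :: rest).Pairwise (fun a b => a.length ≤ b.length)) :
    ((done.filter (fun s => !(U.any (fun t => PySem.Set.issubset t s && t != s)))).any
        (fun k => PySem.Set.issubset k cur))
    = (U.any (fun t => PySem.Set.issubset t cur && t != cur)) := by
  rw [Bool.eq_iff_iff]
  simp only [List.any_eq_true, List.mem_filter, PySem.Set.issubset_iff, Bool.and_eq_true,
    bne_iff_ne, Bool.not_eq_eq_eq_not, Bool.not_true, List.any_eq_false, not_and,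
    ne_eq, Decidable.not_not]
  constructor
  · rintro ⟨k, ⟨hkdone, hPk⟩, hksub⟩
    refine ⟨k, hperm.subset (List.mem_append_left _ hkdone), hksub, ?_⟩
    intro he
    subst he
    exact (List.nodup_append.mp hnd).2.2 k hkdone k List.mem_cons_self rfl
  · rintro ⟨t, htU, htsub, htne⟩
    have hcur : cur ∈ U := hperm.subset (List.mem_append_right _ List.mem_cons_self)
    have hclt := hmem cur hcur
    set W := U.filter (fun u => PySem.Set.issubset u cur && u != cur) with hW
    have htW : t ∈ W := by
      rw [hW, List.mem_filter]
      refine ⟨htU, ?_⟩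
      simp only [Bool.and_eq_true, PySem.Set.issubset_iff, bne_iff_ne, ne_eq]
      exact ⟨htsub, htne⟩
    cases hm : PySem.List.min? W (fun s => (s.length : Int)) with
    | none => exact absurd ((PySem.List.min?_eq_none_iff _ _).mp hm) (List.ne_nil_of_mem htW)
    | some m =>
      have hmW := PySem.List.min?_mem hm
      have hmin := PySem.List.min?_isMin hm
      have hmU : m ∈ U := (List.mem_filter.mp hmW).1
      have hmc := (List.mem_filter.mp hmW).2
      simp only [PySem.Set.issubset_iff, Bool.and_eq_true, bne_iff_ne,
        ne_eq] at hmc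
      obtain ⟨hmsub, hmne⟩ := hmc
      have hmlt := hmem m hmU
      have hmlen : m.length < cur.length := ssub_length_lt hmlt hclt hmsub hmne
      -- m is itself minimal, i.e. the whole-collection test holds for m
      have hPm : ∀ u ∈ U, (∀ x ∈ u, x ∈ m) → u = m := by
        intro u huU husub
        by_contra hune
        have hulen : u.length < m.length := ssub_length_lt (hmem u huU) hmlt husub hune
        have huW : u ∈ W := by
          have husubc : ∀ x ∈ u, x ∈ cur := fun x hx => hmsub x (husub x hx)
          have hunec : u ≠ cur := by
            intro he; subst he; omega
          rw [hW, List.mem_filter]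
          refine ⟨huU, ?_⟩
          simp only [Bool.and_eq_true, PySem.Set.issubset_iff, bne_iff_ne, ne_eq]
          exact ⟨husubc, hunec⟩
        have := hmin u huW
        simp only at this
        omega
      -- m lies in the processed prefix
      have hmdone : m ∈ done := by
        have : m ∈ done ++ cur :: rest := hperm.mem_iff.mpr hmU
        rcases List.mem_append.mp this with h | h
        · exact h
        · rcases List.mem_cons.mp h with h | h
          · exact absurd h hmne
          · have hpw2 : (cur :: rest).Pairwise (fun a b => a.length ≤ b.length) :=
              hpw.sublist (List.sublist_append_right _ _)
            have := (List.pairwise_cons.mp hpw2).1 m h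
            omega
      exact ⟨m, ⟨hmdone, hPm⟩, hmsub⟩

-- the greedy kept-list loop of A computes the whole-collection minimality filter
lemma greedy_aux (U : List (List Int)) (hmem : ∀ s ∈ U, s.Pairwise (· < ·)) :
    ∀ (rest done : List (List Int)),
    (done ++ rest).Perm U → (done ++ rest).Nodup →
    (done ++ rest).Pairwise (fun a b => a.length ≤ b.length) →
    rest.foldl (fun kept cur =>
        if kept.any (fun k => PySem.Set.issubset k cur) then kept else kept ++ [cur])
      (done.filter (fun s => !(U.any (fun t => PySem.Set.issubset t s && t != s))))
    = (done ++ rest).filter (fun s => !(U.any (fun t => PySem.Set.issubset t s && t != s))) := by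
  intro rest
  induction rest with
  | nil => intro done _ _ _; simp
  | cons cur rest ih =>
    intro done hperm hnd hpw
    rw [List.foldl_cons, kept_test_eq U done cur rest hmem hperm hnd hpw]
    have hassoc : (done ++ [cur]) ++ rest = done ++ cur :: rest := by simp
    by_cases hA : (U.any (fun t => PySem.Set.issubset t cur && t != cur)) = true
    · rw [if_pos hA]
      have hfc : (done ++ [cur]).filter
          (fun s => !(U.any (fun t => PySem.Set.issubset t s && t != s)))
          = done.filter (fun s => !(U.any (fun t => PySem.Set.issubset t s && t != s))) := by
        simp [List.filter_append, hA]
      rw [← hfc, ih (done ++ [cur]) (hassoc ▸ hperm) (hassoc ▸ hnd) (hassoc ▸ hpw), hassoc]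
    · rw [if_neg hA]
      have hfc : (done ++ [cur]).filter
          (fun s => !(U.any (fun t => PySem.Set.issubset t s && t != s)))
          = done.filter (fun s => !(U.any (fun t => PySem.Set.issubset t s && t != s))) ++ [cur] := by
        simp [List.filter_append, hA]
      rw [← hfc, ih (done ++ [cur]) (hassoc ▸ hperm) (hassoc ▸ hnd) (hassoc ▸ hpw), hassoc]

theorem greedy_eq_filter (U : List (List Int))
    (hU : U.Nodup) (hmem : ∀ s ∈ U, s.Pairwise (· < ·)) :
    (PySem.List.sorted U (fun s => (s.length : Int))).foldl
        (fun kept cur => if kept.any (fun k => PySem.Set.issubset k cur) then kept else kept ++ [cur]) []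
    = (PySem.List.sorted U (fun s => (s.length : Int))).filter
        (fun s => !(U.any (fun t => PySem.Set.issubset t s && t != s))) := by
  have hperm := PySem.List.sorted_perm U (fun s => (s.length : Int)) false
  have hnd : (PySem.List.sorted U (fun s => (s.length : Int))).Nodup := hperm.nodup_iff.mpr hU
  have hpw : (PySem.List.sorted U (fun s => (s.length : Int))).Pairwise
      (fun a b => a.length ≤ b.length) :=
    (PySem.List.sorted_pairwise U (fun s => (s.length : Int))).imp (by exact_mod_cast fun h => h)
  have := greedy_aux U hmem (PySem.List.sorted U (fun s => (s.length : Int))) []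
    (by simpa using hperm) (by simpa using hnd) (by simpa using hpw)
  simpa using this

-- B-side crux: testing cur against the WHOLE sorted prefix is also the
-- whole-collection proper-subset test (a subset is strictly shorter, hence earlier)
lemma prefix_test_eq (U : List (List Int)) (done cur : _) (rest : List (List Int))
    (hmem : ∀ s ∈ U, s.Pairwise (· < ·))
    (hperm : (done ++ cur :: rest).Perm U)
    (hnd : (done ++ cur :: rest).Nodup)
    (hpw : (done ++ cur :: rest).Pairwise (fun a b => a.length ≤ b.length)) :
    (done.any (fun t => PySem.Set.issubset t cur))
    = (U.any (fun t => PySem.Set.issubset t cur && t != cur)) := by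
  rw [Bool.eq_iff_iff]
  simp only [List.any_eq_true, PySem.Set.issubset_iff, Bool.and_eq_true, bne_iff_ne, ne_eq]
  constructor
  · rintro ⟨k, hkdone, hksub⟩
    refine ⟨k, hperm.subset (List.mem_append_left _ hkdone), hksub, ?_⟩
    intro he
    subst he
    exact (List.nodup_append.mp hnd).2.2 k hkdone k List.mem_cons_self rfl
  · rintro ⟨t, htU, htsub, htne⟩
    have hcur : cur ∈ U := hperm.subset (List.mem_append_right _ List.mem_cons_self)
    have htlen : t.length < cur.length :=
      ssub_length_lt (hmem t htU) (hmem cur hcur) htsub htne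
    have htdone : t ∈ done := by
      have : t ∈ done ++ cur :: rest := hperm.mem_iff.mpr htU
      rcases List.mem_append.mp this with h | h
      · exact h
      · rcases List.mem_cons.mp h with h | h
        · exact absurd h htne
        · have hpw2 : (cur :: rest).Pairwise (fun a b => a.length ≤ b.length) :=
            hpw.sublist (List.sublist_append_right _ _)
          have := (List.pairwise_cons.mp hpw2).1 t h
          omega
    exact ⟨t, htdone, htsub⟩

-- B's positional sieve computes the whole-collection minimality filter
lemma enum_aux (U order : List (List Int)) (hmem : ∀ s ∈ U, s.Pairwise (· < ·))
    (hperm : order.Perm U) (hnd : order.Nodup)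
    (hpw : order.Pairwise (fun a b => a.length ≤ b.length)) :
    ∀ (rest done : List (List Int)), order = done ++ rest →
    (PySem.List.enumerate rest (done.length : Int)).filterMap
        (fun is => if (PySem.List.slice order (some 0) (some is.1)).any
            (fun t => PySem.Set.issubset t is.2) then none else some is.2)
    = rest.filter (fun s => !(U.any (fun t => PySem.Set.issubset t s && t != s))) := by
  intro rest
  induction rest with
  | nil => intro done _; simp [PySem.List.enumerate]
  | cons cur rest ih =>
    intro done horder
    rw [PySem.List.enumerate_cons]
    have hslice : PySem.List.slice order none (some (done.length : Int)) = done := by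
      rw [PySem.List.slice_to_natCast, horder]
      exact List.take_left
    have htest : (done.any (fun t => PySem.Set.issubset t cur))
        = (U.any (fun t => PySem.Set.issubset t cur && t != cur)) :=
      prefix_test_eq U done cur rest hmem (horder ▸ hperm) (horder ▸ hnd) (horder ▸ hpw)
    have hlen : (((done ++ [cur]).length : Int)) = (done.length : Int) + 1 := by simp
    have hrec := ih (done ++ [cur]) (by simp [horder])
    rw [hlen] at hrec
    by_cases hA : (U.any (fun t => PySem.Set.issubset t cur && t != cur)) = true
    · rw [List.filterMap_cons_none (by simp [hslice, htest, hA]), hrec,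
        List.filter_cons_of_neg (by simp [hA])]
    · rw [List.filterMap_cons_some (b := cur) (by simp [hslice, htest, hA]), hrec,
        List.filter_cons_of_pos (by simp [hA])]

-- ===== VERDICT (by name: the statement is the Claim_ definition above) =====
theorem filter_logical_pairs_spec : Claim_equal_filter_logical_pairs := by
  intro lpr cps _ _
  unfold Spec_filter_logical_pairs filter_logical_pairs filter_logical_pairs_alt
  -- phase 1: both collections are the same list of canonical diff sets
  have hfm : cps.filterMap (fun p =>
        let d := pvMergeDiff ((pvRoutes lpr).getD p.1 []) ((pvRoutes lpr).getD p.2 [])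
        if d = [] then none else some d)
      = cps.filterMap (fun p =>
        let d := pvDiffSet (PySem.Dict.mk lpr) p; if d = [] then none else some d) := by
    apply List.filterMap_congr
    intro p _
    rw [mergeDiff_eq_diffSet lpr p]
  simp only [hfm, phase1_eq]
  set U : List (List Int) := PySem.Set.ofList (cps.filterMap (fun p =>
      let d := pvDiffSet (PySem.Dict.mk lpr) p; if d = [] then none else some d)) with hU
  have hUnd : U.Nodup := PySem.Set.nodup_ofList _
  have hUmem : ∀ s ∈ U, s.Pairwise (· < ·) := by
    intro s hs
    exact mem_diffs_lt ((PySem.Set.mem_ofList _ _).1 hs)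
  -- phase 2: both loops compute the whole-collection minimality filter
  rw [greedy_eq_filter U hUnd hUmem]
  have hperm := PySem.List.sorted_perm U (fun s => (s.length : Int)) false
  have hnd := hperm.nodup_iff.mpr hUnd
  have hpw : (PySem.List.sorted U (fun s => (s.length : Int))).Pairwise
      (fun a b => a.length ≤ b.length) :=
    (PySem.List.sorted_pairwise U (fun s => (s.length : Int))).imp (by exact_mod_cast fun h => h)
  have := enum_aux U (PySem.List.sorted U (fun s => (s.length : Int))) hUmem hperm hnd hpw
    (PySem.List.sorted U (fun s => (s.length : Int))) [] rfl
  simpa using this.symm
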